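-- pv_equiv track=rewrite | github.com/SandersJ16/Pygex | pygex/engine.py | break_parts
-- ===== SOURCE A (Python) =====
-- def break_parts(pattern):
--     parts = []
--
--     pattern_iter = iter(pattern)
--     last_part = None
--     while True:
--         try:
--             part = next(pattern_iter)
--             if part == "*":
--                 parts.append(last_part + part)
--             elif last_part != "*" and last_part is not None:
--                 parts.append(last_part)
--             last_part = part
--         except StopIteration:
--             if last_part != "*" and last_part is not None:
--                 parts.append(last_part)
--             break
--     return parts
-- ===== SOURCE B (Python) =====
-- def break_parts(pattern):
--     chars = list(pattern)
--     prevs = [None] + chars[:-1]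
--     nexts = chars[1:] + [None]
--     return [p + c if c == "*" else c
--             for p, c, nx in zip(prevs, chars, nexts)
--             if c == "*" or nx != "*"]
-- ===== Notes on version B (the rewrite author's own statement) =====
-- stated objective: alternative
-- what changed: Replaces A's exception-driven iterator loop with deferred last_part state by a stateless list comprehension over zip([None]+chars[:-1], chars, chars[1:]+[None]) triples that decides each emission locally by lookahead.
-- outside the precondition, e.g. on break_parts('*'): A raises TypeError, B raises TypeError
import Mathlib
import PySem

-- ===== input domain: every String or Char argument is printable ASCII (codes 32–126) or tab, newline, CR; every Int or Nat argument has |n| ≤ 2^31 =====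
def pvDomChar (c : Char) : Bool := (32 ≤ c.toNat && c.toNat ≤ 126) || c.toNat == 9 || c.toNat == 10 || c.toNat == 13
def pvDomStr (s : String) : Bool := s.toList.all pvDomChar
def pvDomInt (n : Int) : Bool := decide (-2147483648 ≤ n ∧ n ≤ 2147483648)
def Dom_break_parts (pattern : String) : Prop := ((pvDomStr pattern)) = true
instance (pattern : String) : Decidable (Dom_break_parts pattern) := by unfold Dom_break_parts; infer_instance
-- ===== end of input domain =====

-- B replaces A's exception-driven iterator loop with deferred emission by a stateless
-- zip3 comprehension over (prev, char, next) triples (objective: alternative decomposition).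

-- ===== PORT A =====
-- A: iterate the chars keeping last_part; on '*' emit last_part+'*'; on a non-star and
-- at StopIteration emit the pending last_part unless it is '*' or None.  'last.getD ""'
-- only makes the port total: under Pre_ the first char is not '*', so last is never
-- none when it is read (Python raises TypeError there).
def breakPartsA_go (acc : List String) (last : Option String) : List Char → List String
  | [] =>
      acc ++ (match last with
              | none => []
              | some l => if l = "*" then [] else [l])
  | c :: rest =>
      if c = '*' then
        breakPartsA_go (acc ++ [(last.getD "") ++ "*"]) (some (String.ofList [c])) rest
      else
        breakPartsA_go
          (acc ++ (match last with
                   | none => []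
                   | some l => if l = "*" then [] else [l]))
          (some (String.ofList [c])) rest

def break_parts (pattern : String) : List String :=
  breakPartsA_go [] none pattern.toList

-- ===== PORT B =====
-- B: zip (prevs, chars, nexts) with prevs = [None]+chars[:-1], nexts = chars[1:]+[None]
-- (ported with dropLast / tail, exact for these Python slices), keep a triple when the
-- char is '*' or the next char is not '*', and emit prev+'*' for a star, the char
-- itself otherwise.  The 'none => "*"' arm only makes p + "*" total: Python B raises
-- TypeError there (leading star), which Pre_ excludes.
def break_parts_alt (pattern : String) : List String :=
  let chars := pattern.toList
  let prevs : List (Option Char) := none :: chars.dropLast.map some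
  let nexts : List (Option Char) := chars.tail.map some ++ [none]
  (prevs.zip (chars.zip nexts)).flatMap fun pcn =>
    if pcn.2.1 = '*' ∨ pcn.2.2 ≠ some '*' then
      [if pcn.2.1 = '*' then
         (match pcn.1 with | some q => String.ofList [q] ++ "*" | none => "*")
       else String.ofList [pcn.2.1]]
    else []

-- ===== PRECONDITION & SPEC =====
-- Pre_ excludes patterns whose first character is '*': there A raises TypeError
-- (None + str), and B raises the same TypeError.
def Pre_break_parts (pattern : String) : Prop := pattern.toList.head? ≠ some '*'
instance (pattern : String) : Decidable (Pre_break_parts pattern) := by unfold Pre_break_parts; infer_instance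
def pvWitness_break_parts : String := "ab*c**"

def Spec_break_parts (pattern : String) (out : List String) : Prop := out = break_parts_alt pattern
instance (pattern : String) (out : List String) : Decidable (Spec_break_parts pattern out) := by unfold Spec_break_parts; infer_instance

-- ===== CLAIM (what is proved, stated in full; the proofs are below) =====
def Claim_equal_break_parts : Prop := ∀ (pattern : String), Dom_break_parts pattern → Pre_break_parts pattern → Spec_break_parts pattern (break_parts pattern)

-- ===== LEMMAS AND PROOFS =====

-- B's zip comprehension with the first prev generalized to p.
def zrec (p : Option Char) (cs : List Char) : List String :=
  ((p :: cs.dropLast.map some).zip (cs.zip (cs.tail.map some ++ [none]))).flatMap fun pcn =>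
    if pcn.2.1 = '*' ∨ pcn.2.2 ≠ some '*' then
      [if pcn.2.1 = '*' then
         (match pcn.1 with | some q => String.ofList [q] ++ "*" | none => "*")
       else String.ofList [pcn.2.1]]
    else []

theorem break_parts_alt_eq_zrec (pattern : String) :
    break_parts_alt pattern = zrec none pattern.toList := rfl

theorem zrec_cons (p : Option Char) (c : Char) (rest : List Char) :
    zrec p (c :: rest) =
      (if c = '*' ∨ rest.head? ≠ some '*' then
        [if c = '*' then
           (match p with | some q => String.ofList [q] ++ "*" | none => "*")
         else String.ofList [c]]
       else []) ++ zrec (some c) rest := by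
  cases rest with
  | nil => simp [zrec]
  | cons r rs => simp [zrec]

theorem ofList_singleton_eq_star (c : Char) : (String.ofList [c] = "*") ↔ c = '*' := by
  constructor
  · intro h
    have := congrArg String.toList h
    simp at this
    exact this
  · intro h; subst h; rfl

-- Main invariant: A with pending character p equals p's deferred emission followed by
-- B's comprehension over the remaining triples.
theorem goA_eq_zrec (cs : List Char) :
    ∀ (acc : List String) (p : Char),
      breakPartsA_go acc (some (String.ofList [p])) cs =
        acc ++ (if p ≠ '*' ∧ cs.head? ≠ some '*' then [String.ofList [p]] else [])
            ++ zrec (some p) cs := by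
  induction cs with
  | nil =>
      intro acc p
      simp only [breakPartsA_go, zrec, List.head?_nil]
      by_cases hp : p = '*' <;>
        simp [hp, ofList_singleton_eq_star]
  | cons c rest ih =>
      intro acc p
      rw [zrec_cons]
      by_cases hc : c = '*'
      · subst hc
        simp only [breakPartsA_go, Option.getD_some]
        rw [ih]
        simp [List.append_assoc]
      · simp only [breakPartsA_go, if_neg hc]
        rw [ih]
        by_cases hp : p = '*' <;> by_cases hr : rest.head? = some '*' <;>
          simp [hp, hr, hc, ofList_singleton_eq_star, List.append_assoc]

-- ===== VERDICT (by name: the statement is the Claim_ definition above) =====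
theorem break_parts_spec : Claim_equal_break_parts := by
  intro pattern _ hpre
  unfold Spec_break_parts
  rw [break_parts_alt_eq_zrec]
  unfold break_parts
  unfold Pre_break_parts at hpre
  cases hcs : pattern.toList with
  | nil => rfl
  | cons c rest =>
      rw [hcs] at hpre
      simp only [List.head?_cons, ne_eq, Option.some.injEq] at hpre
      rw [zrec_cons]
      simp only [breakPartsA_go, if_neg hpre]
      rw [goA_eq_zrec]
      by_cases hr : rest.head? = some '*' <;> simp [hr, hpre]
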